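-- pv_equiv track=rewrite | github.com/anpom13/Presidente | car.py | nods
-- ===== SOURCE A (Python) =====
-- def nods(a, z, s):
--   l = []
--   c = 0
--   d = 0
--   b = a
--   l.append(b)
--   for i in range(0,len(s)):
--     if i != 0:
--       if s[i] != s[i-1]:
--         x = i-d
--         d = i
--         y = s[i-1]
--         if y == 0:
--           b = (b[0] + x, b[1])
--           l.append(b)
--         if y == 1:
--           b = (b[0], b[1]+x)
--           l.append(b)
--         if y == 2:
--           b = (b[0] - x, b[1])
--           l.append(b)
--         if y == 3:
--           b = (b[0], b[1]-x)
--           l.append(b)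
--
--
--   l.append(z)
--   return l
-- ===== SOURCE B (Python) =====
-- def nods(a, z, s):
--     # run-length decomposition first, then one pass over all runs except the last
--     runs = []
--     for v in s:
--         if runs and runs[-1][0] == v:
--             runs[-1][1] += 1
--         else:
--             runs.append([v, 1])
--     b = a
--     out = [a]
--     for v, n in runs[:-1]:
--         if v == 0:
--             b = (b[0] + n, b[1])
--             out.append(b)
--         elif v == 1:
--             b = (b[0], b[1] + n)
--             out.append(b)
--         elif v == 2:
--             b = (b[0] - n, b[1])
--             out.append(b)
--         elif v == 3:
--             b = (b[0], b[1] - n)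
--             out.append(b)
--     out.append(z)
--     return out
-- ===== Notes on version B (the rewrite author's own statement) =====
-- stated objective: alternative
-- what changed: B first decomposes s into (direction, run-length) runs in one accumulating pass and then walks every run except the last, instead of A's per-index transition detection with a last-transition index d used to reconstruct run lengths.
import Mathlib
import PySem

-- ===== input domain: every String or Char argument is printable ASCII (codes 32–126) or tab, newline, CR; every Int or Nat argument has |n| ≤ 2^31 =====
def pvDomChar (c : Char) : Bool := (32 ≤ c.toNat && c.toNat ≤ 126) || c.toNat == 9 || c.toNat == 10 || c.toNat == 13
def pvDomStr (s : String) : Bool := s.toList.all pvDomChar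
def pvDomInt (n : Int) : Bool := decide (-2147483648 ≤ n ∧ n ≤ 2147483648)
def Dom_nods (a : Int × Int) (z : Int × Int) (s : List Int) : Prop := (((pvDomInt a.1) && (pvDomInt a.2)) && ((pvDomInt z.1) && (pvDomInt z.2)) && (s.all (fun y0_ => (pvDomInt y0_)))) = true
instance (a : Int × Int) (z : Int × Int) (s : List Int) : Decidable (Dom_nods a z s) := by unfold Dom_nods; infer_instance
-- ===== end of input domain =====

-- B replaces A's per-index transition detection with a run-length decomposition followed
-- by one pass over all runs except the last (objective: alternative decomposition).


-- ===== PORT A =====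
-- the loop body of A; state is (l, c, d, b) as in the Python; s[i] / s[i-1] are always
-- in range when reached (i runs over range(0, len(s)), the inner branch needs i ≠ 0),
-- so the total pyGetD with an arbitrary default is exact here
def nodsStep (s : List Int) (st : List (Int × Int) × Int × Int × (Int × Int)) (i : Int) :
    List (Int × Int) × Int × Int × (Int × Int) :=
  match st with
  | (l, c, d, b) =>
    if i ≠ 0 then
      if PySem.List.pyGetD s i 0 ≠ PySem.List.pyGetD s (i - 1) 0 then
        let x := i - d
        let d' := i
        let y := PySem.List.pyGetD s (i - 1) 0
        let bl1 := if y = 0 then ((b.1 + x, b.2), l ++ [(b.1 + x, b.2)]) else (b, l)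
        let bl2 := if y = 1 then ((bl1.1.1, bl1.1.2 + x), bl1.2 ++ [(bl1.1.1, bl1.1.2 + x)]) else bl1
        let bl3 := if y = 2 then ((bl2.1.1 - x, bl2.1.2), bl2.2 ++ [(bl2.1.1 - x, bl2.1.2)]) else bl2
        let bl4 := if y = 3 then ((bl3.1.1, bl3.1.2 - x), bl3.2 ++ [(bl3.1.1, bl3.1.2 - x)]) else bl3
        (bl4.2, c, d', bl4.1)
      else (l, c, d, b)
    else (l, c, d, b)

def nods (a : Int × Int) (z : Int × Int) (s : List Int) : List (Int × Int) :=
  ((PySem.List.pyRange 0 (PySem.List.len s) 1).foldl (nodsStep s) ([a], 0, 0, a)).1 ++ [z]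

-- ===== PORT B =====
-- run-length builder: one accumulating pass (Python: extend last run or start a new one)
def addRun (runs : List (Int × Int)) (v : Int) : List (Int × Int) :=
  match runs.getLast? with
  | some (k, n) => if k = v then runs.dropLast ++ [(k, n + 1)] else runs ++ [(v, 1)]
  | none => [(v, 1)]

-- processing of one run (v, n): advance b along the axis of v and append, else skip
def runStep (st : (Int × Int) × List (Int × Int)) (r : Int × Int) :
    (Int × Int) × List (Int × Int) :=
  match st, r with
  | (b, out), (v, n) =>
    if v = 0 then ((b.1 + n, b.2), out ++ [(b.1 + n, b.2)])
    else if v = 1 then ((b.1, b.2 + n), out ++ [(b.1, b.2 + n)])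
    else if v = 2 then ((b.1 - n, b.2), out ++ [(b.1 - n, b.2)])
    else if v = 3 then ((b.1, b.2 - n), out ++ [(b.1, b.2 - n)])
    else (b, out)

def nods_alt (a : Int × Int) (z : Int × Int) (s : List Int) : List (Int × Int) :=
  (((s.foldl addRun []).dropLast).foldl runStep (a, [a])).2 ++ [z]

-- ===== PRECONDITION & SPEC =====
def Spec_nods (a : Int × Int) (z : Int × Int) (s : List Int) (out : List (Int × Int)) : Prop := out = nods_alt a z s
instance (a : Int × Int) (z : Int × Int) (s : List Int) (out : List (Int × Int)) : Decidable (Spec_nods a z s out) := by unfold Spec_nods; infer_instance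

-- ===== CLAIM (what is proved, stated in full; the proofs are below) =====
def Claim_equal_nods : Prop := ∀ (a : Int × Int) (z : Int × Int) (s : List Int), Dom_nods a z s → Spec_nods a z s (nods a z s)

-- ===== LEMMAS AND PROOFS =====

-- runs of a list whose current (still open) run has value y and length k
def runsAux (y k : Int) : List Int → List (Int × Int)
  | [] => [(y, k)]
  | v :: rest => if v = y then runsAux y (k + 1) rest else (y, k) :: runsAux v 1 rest

theorem runsAux_cons_self (y k : Int) (rest : List Int) :
    runsAux y k (y :: rest) = runsAux y (k + 1) rest := by
  simp [runsAux]

theorem runsAux_ne_nil (y k : Int) (s : List Int) : runsAux y k s ≠ [] := by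
  induction s generalizing y k with
  | nil => simp [runsAux]
  | cons v rest ih =>
    simp only [runsAux]
    split
    · exact ih _ _
    · simp

theorem foldl_addRun (rest : List Int) : ∀ (acc : List (Int × Int)) (y k : Int),
    rest.foldl addRun (acc ++ [(y, k)]) = acc ++ runsAux y k rest := by
  induction rest with
  | nil => intro acc y k; simp [runsAux]
  | cons v rest ih =>
    intro acc y k
    simp only [List.foldl_cons, runsAux]
    by_cases hv : v = y
    · have : addRun (acc ++ [(y, k)]) v = acc ++ [(y, k + 1)] := by
        simp [addRun, hv]
      rw [this, ih]
      simp [hv]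
    · have h0 : addRun (acc ++ [(y, k)]) v = (acc ++ [(y, k)]) ++ [(v, 1)] := by
        simp [addRun]
        intro h; exact absurd h.symm hv
      have h2 := ih (acc ++ [(y, k)]) v 1
      rw [h0, h2]
      simp [hv]

-- the step of A at a transition index computes exactly runStep of the closed run
theorem nodsStep_transition (s : List Int) (l : List (Int × Int)) (c d : Int) (b : Int × Int)
    (i : Int) (hi : i ≠ 0)
    (hne : PySem.List.pyGetD s i 0 ≠ PySem.List.pyGetD s (i - 1) 0) :
    nodsStep s (l, c, d, b) i =
      ((runStep (b, l) (PySem.List.pyGetD s (i - 1) 0, i - d)).2, c, i,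
       (runStep (b, l) (PySem.List.pyGetD s (i - 1) 0, i - d)).1) := by
  set y := PySem.List.pyGetD s (i - 1) 0 with hy
  simp only [nodsStep, runStep, if_pos hi, if_pos hne, ← hy]
  by_cases h0 : y = 0
  · simp [h0]
  · by_cases h1 : y = 1
    · simp [h1]
    · by_cases h2 : y = 2
      · simp [h2]
      · by_cases h3 : y = 3
        · simp [h3]
        · simp [h1, h2, h3]

-- the step of A at a non-transition index leaves the state unchanged
theorem nodsStep_same (s : List Int) (l : List (Int × Int)) (c d : Int) (b : Int × Int)
    (i : Int)
    (heq : PySem.List.pyGetD s i 0 = PySem.List.pyGetD s (i - 1) 0) :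
    nodsStep s (l, c, d, b) i = (l, c, d, b) := by
  simp [nodsStep, heq]

theorem pyGetD_append_length (pre rest : List Int) (v : Int) :
    PySem.List.pyGetD (pre ++ v :: rest) (pre.length : Int) 0 = v := by
  rw [PySem.List.pyGetD_natCast]
  simp [List.getD]

theorem pyGetD_append_last (pre rest : List Int) (hpre : pre ≠ []) :
    PySem.List.pyGetD (pre ++ rest) ((pre.length : Int) - 1) 0 = pre.getLast hpre := by
  have h1 : ((pre.length : Int) - 1) = ((pre.length - 1 : Nat) : Int) := by
    have := List.length_pos_iff.mpr hpre; push_cast [Nat.cast_sub this]; ring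
  rw [h1, PySem.List.pyGetD_natCast]
  have hlt : pre.length - 1 < pre.length := by
    have := List.length_pos_iff.mpr hpre; omega
  simp [List.getD, List.getElem?_append_left hlt, List.getElem?_eq_getElem hlt,
    List.getLast_eq_getElem]

-- main loop invariant: once i has reached the start of rest, with pre the processed
-- prefix (whose last element heads the current run, open since index d), A's fold
-- computes B's fold over the closed runs of rest
theorem loopA (rest : List Int) : ∀ (pre : List Int) (hpre : pre ≠ []) (c d : Int)
    (l : List (Int × Int)) (b : Int × Int),
    ∃ d', (PySem.List.pyRange (pre.length : Int) (((pre ++ rest).length : Nat) : Int) 1).foldl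
        (nodsStep (pre ++ rest)) (l, c, d, b) =
      (((runsAux (pre.getLast hpre) ((pre.length : Int) - d) rest).dropLast.foldl
          runStep (b, l)).2, c, d',
       ((runsAux (pre.getLast hpre) ((pre.length : Int) - d) rest).dropLast.foldl
          runStep (b, l)).1) := by
  induction rest with
  | nil =>
    intro pre hpre c d l b
    refine ⟨d, ?_⟩
    have : PySem.List.pyRange (pre.length : Int) (((pre ++ []).length : Nat) : Int) 1 = [] := by
      simp
    rw [this]
    simp [runsAux]
  | cons v rest ih =>
    intro pre hpre c d l b
    have hlt : (pre.length : Int) < (((pre ++ v :: rest).length : Nat) : Int) := by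
      simp
    rw [PySem.List.pyRange_one_cons hlt, List.foldl_cons]
    have hgi : PySem.List.pyGetD (pre ++ v :: rest) (pre.length : Int) 0 = v :=
      pyGetD_append_length pre rest v
    have hgp : PySem.List.pyGetD (pre ++ v :: rest) ((pre.length : Int) - 1) 0
        = pre.getLast hpre := pyGetD_append_last pre (v :: rest) hpre
    have hi0 : (pre.length : Int) ≠ 0 := by
      have := List.length_pos_iff.mpr hpre; omega
    have hassoc : pre ++ v :: rest = (pre ++ [v]) ++ rest := by simp
    have hlast : (pre ++ [v]).getLast (by simp) = v := by simp
    have hlen : ((pre ++ [v]).length : Int) = (pre.length : Int) + 1 := by simp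
    by_cases hv : v = pre.getLast hpre
    · -- same run continues: state unchanged, run length grows
      rw [nodsStep_same _ _ _ _ _ _ (by rw [hgi, hgp, hv])]
      obtain ⟨d', hd'⟩ := ih (pre ++ [v]) (by simp) c d l b
      refine ⟨d', ?_⟩
      rw [hlen] at hd'
      rw [hassoc, hd']
      have : runsAux (pre.getLast hpre) ((pre.length : Int) - d) (v :: rest)
          = runsAux ((pre ++ [v]).getLast (by simp)) ((pre.length : Int) + 1 - d) rest := by
        rw [hlast, hv, runsAux_cons_self]
        congr 1
        ring
      rw [this]
    · -- transition: A closes the run exactly as runStep does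
      rw [nodsStep_transition _ _ _ _ _ _ hi0 (by rw [hgi, hgp]; exact fun h => hv h)]
      rw [hgp]
      obtain ⟨d', hd'⟩ := ih (pre ++ [v]) (by simp) c (pre.length : Int)
        (runStep (b, l) (pre.getLast hpre, (pre.length : Int) - d)).2
        (runStep (b, l) (pre.getLast hpre, (pre.length : Int) - d)).1
      refine ⟨d', ?_⟩
      rw [hlen] at hd'
      rw [hassoc, hd']
      have hrw : runsAux (pre.getLast hpre) ((pre.length : Int) - d) (v :: rest)
          = (pre.getLast hpre, (pre.length : Int) - d) :: runsAux v 1 rest := by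
        rw [runsAux, if_neg hv]
      rw [hrw, List.dropLast_cons_of_ne_nil (runsAux_ne_nil _ _ _), List.foldl_cons]
      have h1 : ((pre.length : Int)) + 1 - (pre.length : Int) = 1 := by ring
      rw [hlast, h1]

-- ===== VERDICT (by name: the statement is the Claim_ definition above) =====
theorem nods_spec : Claim_equal_nods := by
  intro a z s _
  unfold Spec_nods
  cases s with
  | nil => simp [nods, nods_alt, PySem.List.len]
  | cons v rest =>
    unfold nods nods_alt
    have hlen : PySem.List.len (v :: rest) = (((v :: rest).length : Nat) : Int) := by
      simp [PySem.List.len_eq]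
    have hpos : (0 : Int) < (((v :: rest).length : Nat) : Int) := by simp
    rw [hlen, PySem.List.pyRange_one_cons hpos, List.foldl_cons]
    have hstep0 : nodsStep (v :: rest) ([a], 0, 0, a) 0 = ([a], 0, 0, a) := by
      simp [nodsStep]
    rw [hstep0]
    have hruns : (v :: rest).foldl addRun [] = runsAux v 1 rest := by
      have : addRun [] v = [(v, 1)] := by simp [addRun]
      rw [List.foldl_cons, this]
      simpa using foldl_addRun rest [] v 1
    obtain ⟨d', hd'⟩ := loopA rest [v] (by simp) 0 0 [a] a
    have h2 : ([v] : List Int).getLast (by simp) = v := rfl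
    rw [h2] at hd'
    simp only [List.singleton_append, List.length_singleton, Nat.cast_one, sub_zero] at hd'
    rw [show ((0 : Int) + 1) = 1 from by norm_num, hd', hruns]
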